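-- pv_equiv track=rewrite | github.com/Junha7777/Online-Judge | Python/백준/Bronze/12086. Moist （Small2）/Moist （Small2）.py | calculate_sorting_cost
-- ===== SOURCE A (Python) =====
-- from bisect import bisect_left
--
-- def calculate_sorting_cost(cards):
--     sorted_list = []
--     cost = 0
--     for card in cards:
--         idx = bisect_left(sorted_list, card)
--         if idx < len(sorted_list):
--             cost += 1
--         sorted_list.insert(idx, card)
--     return cost
-- ===== SOURCE B (Python) =====
-- def calculate_sorting_cost(cards):
--     cost = 0
--     mx = None
--     for card in cards:
--         if mx is None or card > mx:
--             mx = card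
--         else:
--             cost += 1
--     return cost
-- ===== Notes on version B (the rewrite author's own statement) =====
-- stated objective: faster
-- what changed: Replaced the insertion-sort simulation (bisect + list.insert per card) by a single pass that tracks only the running maximum and counts cards that do not strictly exceed it.
import Mathlib
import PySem

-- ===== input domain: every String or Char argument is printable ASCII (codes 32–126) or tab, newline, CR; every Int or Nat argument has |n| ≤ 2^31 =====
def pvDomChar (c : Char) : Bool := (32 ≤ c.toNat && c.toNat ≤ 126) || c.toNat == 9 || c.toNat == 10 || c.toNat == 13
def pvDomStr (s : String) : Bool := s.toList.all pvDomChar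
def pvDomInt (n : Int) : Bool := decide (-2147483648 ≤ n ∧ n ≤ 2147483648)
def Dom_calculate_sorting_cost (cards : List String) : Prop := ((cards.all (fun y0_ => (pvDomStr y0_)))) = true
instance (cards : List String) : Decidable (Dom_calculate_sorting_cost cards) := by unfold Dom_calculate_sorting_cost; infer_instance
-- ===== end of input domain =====

-- B replaces A's per-card bisect + list.insert (insertion-sort simulation) by a single pass
-- that tracks only the running maximum and counts cards not strictly above it.

-- ===== PORT A =====
-- loop body of A: idx = bisect_left(sorted_list, card); if idx < len: cost += 1; sorted_list.insert(idx, card)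
def pvStepA (st : List String × Int) (card : String) : List String × Int :=
  let idx := PySem.List.bisectLeft st.1 card
  let cost := if idx < st.1.length then st.2 + 1 else st.2
  (PySem.List.insert st.1 (idx : Int) card, cost)

def calculate_sorting_cost (cards : List String) : Int :=
  (cards.foldl pvStepA ([], 0)).2

-- ===== PORT B =====
-- loop body of B: if mx is None or card > mx: mx = card else: cost += 1
def pvStepB (st : Option String × Int) (card : String) : Option String × Int :=
  match st.1 with
  | none => (some card, st.2)
  | some mx => if mx < card then (some card, st.2) else (some mx, st.2 + 1)

def calculate_sorting_cost_alt (cards : List String) : Int :=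
  (cards.foldl pvStepB (none, 0)).2

-- ===== PRECONDITION & SPEC =====
def Spec_calculate_sorting_cost (cards : List String) (out : Int) : Prop := out = calculate_sorting_cost_alt cards
instance (cards : List String) (out : Int) : Decidable (Spec_calculate_sorting_cost cards out) := by unfold Spec_calculate_sorting_cost; infer_instance

-- ===== CLAIM (what is proved, stated in full; the proofs are below) =====
def Claim_equal_calculate_sorting_cost : Prop := ∀ (cards : List String), Dom_calculate_sorting_cost cards → Spec_calculate_sorting_cost cards (calculate_sorting_cost cards)

-- ===== LEMMAS AND PROOFS =====

theorem pvBllSpec (xs : List String) (x : String) (hs : xs.Pairwise (· ≤ ·)) :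
    ∀ (fuel lo hi : ℕ), lo ≤ hi → hi ≤ xs.length → hi - lo ≤ fuel →
    (∀ (j : ℕ) (hj : j < xs.length), j < lo → xs[j] < x) →
    (∀ (j : ℕ) (hj : j < xs.length), hi ≤ j → x ≤ xs[j]) →
    (∀ (j : ℕ) (hj : j < xs.length), j < PySem.List.bisectLeftLoop xs x fuel lo hi → xs[j] < x) ∧
    (∀ (j : ℕ) (hj : j < xs.length), PySem.List.bisectLeftLoop xs x fuel lo hi ≤ j → x ≤ xs[j]) ∧
    PySem.List.bisectLeftLoop xs x fuel lo hi ≤ xs.length := by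
  intro fuel
  induction fuel with
  | zero =>
    intro lo hi hlh hhl hf hlo hhi
    rw [PySem.List.bisectLeftLoop]
    exact ⟨hlo, fun j hj hji => hhi j hj (by omega), by omega⟩
  | succ fuel ih =>
    intro lo hi hlh hhl hf hlo hhi
    rw [PySem.List.bisectLeftLoop]
    by_cases h : lo < hi
    · simp only [if_pos h]
      have hm : (lo + hi) / 2 < xs.length := by omega
      rw [List.getElem?_eq_getElem hm]
      have hmono : ∀ (i j : ℕ) (hi' : i < xs.length) (hj' : j < xs.length), i ≤ j → xs[i] ≤ xs[j] := by
        intro i j hi' hj' hij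
        rcases Nat.eq_or_lt_of_le hij with rfl | hlt
        · exact le_refl _
        · exact (List.pairwise_iff_getElem.mp hs) i j hi' hj' hlt
      by_cases hy : xs[(lo + hi) / 2] < x
      · simp only [if_pos hy]
        apply ih ((lo + hi) / 2 + 1) hi (by omega) hhl (by omega)
        · intro j hj hjlt
          exact lt_of_le_of_lt (hmono j ((lo+hi)/2) hj hm (by omega)) hy
        · exact hhi
      · simp only [if_neg hy]
        apply ih lo ((lo + hi) / 2) (by omega) (by omega) (by omega) hlo
        intro j hj hjge
        exact le_trans (not_lt.mp hy) (hmono ((lo+hi)/2) j hm hj hjge)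
    · simp only [if_neg h]
      exact ⟨hlo, fun j hj hji => hhi j hj (by omega), by omega⟩

theorem pvBisectSpec (xs : List String) (x : String) (hs : xs.Pairwise (· ≤ ·)) :
    (∀ (j : ℕ) (hj : j < xs.length), j < PySem.List.bisectLeft xs x → xs[j] < x) ∧
    (∀ (j : ℕ) (hj : j < xs.length), PySem.List.bisectLeft xs x ≤ j → x ≤ xs[j]) ∧
    PySem.List.bisectLeft xs x ≤ xs.length := by
  exact pvBllSpec xs x hs xs.length 0 xs.length (by omega) (le_refl _) (by omega)
    (by omega) (by omega)

theorem pvInv (cards : List String) :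
    ∀ (s : List String) (mx : Option String) (c : Int),
    s.Pairwise (· ≤ ·) →
    (match mx with
     | none => s = []
     | some m => m ∈ s ∧ ∀ x ∈ s, x ≤ m) →
    (cards.foldl pvStepA (s, c)).2 = (cards.foldl pvStepB (mx, c)).2 := by
  induction cards with
  | nil => intro s mx c _ _; rfl
  | cons card rest ih =>
    intro s mx c hs hm
    simp only [List.foldl_cons]
    obtain ⟨h1, h2, h3⟩ := pvBisectSpec s card hs
    -- facts about take/drop at the split point
    set idx := PySem.List.bisectLeft s card with hidx
    have htake : ∀ a ∈ s.take idx, a < card := by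
      intro a ha
      obtain ⟨k, hk, hka⟩ := List.mem_iff_getElem.mp ha
      have hlen := hk
      simp only [List.length_take] at hlen
      have hk' : k < idx := by omega
      have hkl : k < s.length := by omega
      have := h1 k hkl hk'
      rw [List.getElem_take] at hka
      exact hka ▸ this
    have hdrop : ∀ b ∈ s.drop idx, card ≤ b := by
      intro b hb
      obtain ⟨k, hk, hkb⟩ := List.mem_iff_getElem.mp hb
      have hkl : idx + k < s.length := by have := hk; simp [List.length_drop] at this; omega
      have := h2 (idx + k) hkl (by omega)
      rw [List.getElem_drop] at hkb
      exact hkb ▸ this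
    have hins : PySem.List.insert s (idx : Int) card = s.take idx ++ card :: s.drop idx :=
      PySem.List.insert_natCast s idx card h3
    cases mx with
    | none =>
      -- s = []
      subst hm
      have hA : pvStepA ([], c) card = ([card], c) := rfl
      have hB : pvStepB (none, c) card = (some card, c) := rfl
      rw [hA, hB]
      exact ih [card] (some card) c (by simp) (by simp)
    | some m =>
      obtain ⟨hmem, hmax⟩ := hm
      by_cases hlt : m < card
      · -- new strict maximum: idx = len, no cost
        have hidxlen : idx = s.length := by
          by_contra hne
          have hlt2 : idx < s.length := lt_of_le_of_ne h3 hne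
          have := h2 idx hlt2 (le_refl _)
          exact absurd (lt_of_le_of_lt (le_trans this (hmax _ (List.getElem_mem hlt2))) hlt) (lt_irrefl _)
        simp only [pvStepA, pvStepB, hins, ← hidx]
        rw [if_neg (by omega), if_pos hlt]
        have hsl : s.take idx = s := by rw [hidxlen]; simp
        have hdl : s.drop idx = [] := by rw [hidxlen]; simp
        rw [hsl, hdl]
        apply ih (s ++ [card]) (some card) c
        · rw [List.pairwise_append]
          exact ⟨hs, by simp, fun a ha b hb => by
            simp at hb; subst hb; exact le_of_lt (lt_of_le_of_lt (hmax a ha) hlt)⟩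
        · constructor
          · simp
          · intro y hy
            rcases List.mem_append.mp hy with h | h
            · exact le_of_lt (lt_of_le_of_lt (hmax y h) hlt)
            · simp at h; subst h; exact le_refl _
      · -- card ≤ m: cost increments on both sides
        have hcm : card ≤ m := not_lt.mp hlt
        obtain ⟨j, hj, hjm⟩ := List.mem_iff_getElem.mp hmem
        have hidxlt : idx < s.length := by
          rcases Nat.lt_or_ge j idx with h | h
          · exact absurd (hjm ▸ h1 j hj h) (not_lt.mpr hcm)
          · omega
        simp only [pvStepA, pvStepB, hins, ← hidx]
        rw [if_pos hidxlt, if_neg hlt]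
        apply ih (s.take idx ++ card :: s.drop idx) (some m) (c + 1)
        · rw [List.pairwise_append]
          refine ⟨hs.sublist (List.take_sublist _ _), ?_, ?_⟩
          · rw [List.pairwise_cons]
            exact ⟨hdrop, hs.sublist (List.drop_sublist _ _)⟩
          · intro a ha b hb
            rcases List.mem_cons.mp hb with rfl | hb'
            · exact le_of_lt (htake a ha)
            · exact le_trans (le_of_lt (htake a ha)) (hdrop b hb')
        · constructor
          · have : m ∈ s.take idx ++ s.drop idx := by rw [List.take_append_drop]; exact hmem
            rcases List.mem_append.mp this with h | h
            · exact List.mem_append.mpr (Or.inl h)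
            · exact List.mem_append.mpr (Or.inr (List.mem_cons.mpr (Or.inr h)))
          · intro y hy
            rcases List.mem_append.mp hy with h | h
            · exact hmax y (List.mem_of_mem_take h)
            · rcases List.mem_cons.mp h with rfl | h'
              · exact hcm
              · exact hmax y (List.mem_of_mem_drop h')

-- ===== VERDICT (by name: the statement is the Claim_ definition above) =====
theorem calculate_sorting_cost_spec : Claim_equal_calculate_sorting_cost := by
  intro cards _
  unfold Spec_calculate_sorting_cost calculate_sorting_cost calculate_sorting_cost_alt
  exact pvInv cards [] none 0 (by simp) (by simp)
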